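-- pv_equiv track=rewrite | github.com/yum08/nocho | scripts/apify_linkedin_scraper.py | normalize_profile
-- ===== SOURCE A (Python) =====
-- def normalize_profile(profile: str) -> str:
--     """Extract LinkedIn username from URL or handle string."""
--     profile = profile.strip().rstrip('/')
--     # Handle full URLs like https://www.linkedin.com/in/username/
--     for prefix in (
--         'https://www.linkedin.com/in/',
--         'https://linkedin.com/in/',
--         'http://www.linkedin.com/in/',
--         'http://linkedin.com/in/',
--         'www.linkedin.com/in/',
--         'linkedin.com/in/',
--     ):
--         if profile.lower().startswith(prefix.lower()):
--             profile = profile[len(prefix):].split('/')[0].split('?')[0]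
--             break
--     return profile
-- ===== SOURCE B (Python) =====
-- def normalize_profile(profile: str) -> str:
--     """Extract LinkedIn username from URL or handle string."""
--     p = profile.strip().rstrip('/')
--     low = p.lower()
--     # peel an optional scheme, then an optional 'www.', then require 'linkedin.com/in/'
--     if low.startswith('https://'):
--         i = 8
--     elif low.startswith('http://'):
--         i = 7
--     else:
--         i = 0
--     if low[i:].startswith('www.'):
--         i += 4
--     if low[i:].startswith('linkedin.com/in/'):
--         user = []
--         for c in p[i + 16:]:
--             if c == '/' or c == '?':
--                 break
--             user.append(c)
--         return ''.join(user)
--     return p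
-- ===== Notes on version B (the rewrite author's own statement) =====
-- stated objective: simpler
-- what changed: A scans a hard-coded list of six lowercase URL-prefix combinations and slices by the matched prefix's length; B instead peels an optional scheme and an optional www marker once, performs a single host-path prefix check, and collects the username with one take-until-separator pass instead of two successive splits.
import Mathlib
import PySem

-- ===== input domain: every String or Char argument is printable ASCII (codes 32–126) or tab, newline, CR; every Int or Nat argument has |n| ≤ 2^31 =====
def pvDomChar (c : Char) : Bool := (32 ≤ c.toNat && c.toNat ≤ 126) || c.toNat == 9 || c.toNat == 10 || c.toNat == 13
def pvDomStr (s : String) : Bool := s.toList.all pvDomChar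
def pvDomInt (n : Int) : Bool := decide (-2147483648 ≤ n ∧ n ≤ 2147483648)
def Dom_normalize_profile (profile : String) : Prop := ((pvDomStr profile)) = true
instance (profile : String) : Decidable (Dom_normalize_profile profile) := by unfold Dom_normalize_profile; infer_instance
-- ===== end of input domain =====

-- B replaces A's six-prefix linear scan by peeling an optional scheme, then an optional
-- 'www.', then requiring 'linkedin.com/in/' once (objective: simpler/alternative, same cost).

-- ===== PORT A =====
-- shared first line of both Pythons: s.strip().rstrip('/'); rstrip('/') is ported by hand
-- (drop every trailing '/'), exact because rstrip removes exactly the trailing run of '/'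
def pyRstripSlash (cs : List Char) : List Char := (cs.reverse.dropWhile (fun c => c == '/')).reverse

-- Python xs.split(sep)[0]: split with a nonempty separator never returns [], so [0] is headD
def npSplitHead (cs : List Char) (sep : Char) : List Char := (PySem.Chars.splitOn cs [sep]).headD []

-- A's for-loop over the six prefixes with break
def npLoopA (p : List Char) : List String → List Char
  | [] => p
  | pre :: rest =>
    if PySem.Chars.startswith (PySem.Chars.lower p) (PySem.Chars.lower pre.toList) then
      npSplitHead (npSplitHead (PySem.Chars.slice p (some ((pre.toList.length : Nat) : Int)) none) '/') '?'
    else npLoopA p rest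

def normalize_profile (profile : String) : String :=
  String.mk (npLoopA (pyRstripSlash (PySem.Chars.strip profile.toList))
    ["https://www.linkedin.com/in/", "https://linkedin.com/in/", "http://www.linkedin.com/in/",
     "http://linkedin.com/in/", "www.linkedin.com/in/", "linkedin.com/in/"])

-- ===== PORT B =====
-- Source B's 'for c in p[i+16:]: break on / or ?' loop collecting the username
def npTakeUser : List Char → List Char
  | [] => []
  | c :: rest => if c == '/' || c == '?' then [] else c :: npTakeUser rest

def npCoreB (p : List Char) : List Char :=
  let low := PySem.Chars.lower p
  let i : Nat :=
    if PySem.Chars.startswith low "https://".toList then 8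
    else if PySem.Chars.startswith low "http://".toList then 7
    else 0
  let j : Nat :=
    if PySem.Chars.startswith (PySem.Chars.slice low (some (i : Int)) none) "www.".toList then i + 4 else i
  if PySem.Chars.startswith (PySem.Chars.slice low (some (j : Int)) none) "linkedin.com/in/".toList then
    npTakeUser (PySem.Chars.slice p (some ((j + 16 : Nat) : Int)) none)
  else p

def normalize_profile_alt (profile : String) : String :=
  String.mk (npCoreB (pyRstripSlash (PySem.Chars.strip profile.toList)))

-- ===== PRECONDITION & SPEC =====
def Spec_normalize_profile (profile : String) (out : String) : Prop := out = normalize_profile_alt profile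
instance (profile : String) (out : String) : Decidable (Spec_normalize_profile profile out) := by unfold Spec_normalize_profile; infer_instance

-- ===== CLAIM (what is proved, stated in full; the proofs are below) =====
def Claim_equal_normalize_profile : Prop := ∀ (profile : String), Dom_normalize_profile profile → Spec_normalize_profile profile (normalize_profile profile)

-- ===== LEMMAS AND PROOFS =====

-- s.startswith(a + b) splits into a prefix test and a prefix test after dropping |a|
theorem np_sw_append (a b s : List Char) :
    PySem.Chars.startswith s (a ++ b) = (PySem.Chars.startswith s a && PySem.Chars.startswith (s.drop a.length) b) := by
  induction a generalizing s with
  | nil => simp [PySem.Chars.startswith]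
  | cons c cs ih =>
    cases s with
    | nil => simp [PySem.Chars.startswith, List.isPrefixOf]
    | cons d ds =>
      simp only [PySem.Chars.startswith, List.cons_append, List.isPrefixOf, List.length_cons,
        List.drop_succ_cons] at *
      cases h : (c == d) <;> simp [h, ih]

-- if a and b are incomparable lists, a string starting with a cannot start with b
theorem np_sw_excl {s : List Char} (a b : List Char)
    (hna : (a.isPrefixOf b || b.isPrefixOf a) = false)
    (ha : PySem.Chars.startswith s a = true) : PySem.Chars.startswith s b = false := by
  by_contra hb
  rw [Bool.not_eq_false] at hb
  rw [PySem.Chars.startswith_iff] at ha hb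
  simp only [Bool.or_eq_false_iff] at hna
  rcases Nat.le_total a.length b.length with h | h
  · exact absurd (List.isPrefixOf_iff_prefix.mpr (List.prefix_of_prefix_length_le ha hb h))
      (by simp [hna.1])
  · exact absurd (List.isPrefixOf_iff_prefix.mpr (List.prefix_of_prefix_length_le hb ha h))
      (by simp [hna.2])

-- once something has been pushed on the accumulator, it is the head of splitOn.go's result
theorem np_go_push (sep : List Char) (fuel : Nat) :
    ∀ (l cur : List Char) (acc : List (List Char)) (a : List Char),
      (PySem.Chars.splitOn.go sep fuel l cur (acc ++ [a])).headD [] = a := by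
  induction fuel with
  | zero => intro l cur acc a; simp [PySem.Chars.splitOn.go]
  | succ n ih =>
    intro l cur acc a
    cases l with
    | nil => simp [PySem.Chars.splitOn.go]
    | cons c rest =>
      rw [PySem.Chars.splitOn.go]
      split
      · rw [← List.cons_append]; exact ih _ _ _ _
      · exact ih _ _ _ _

-- the first piece of a single-character split is the take-while up to that character
theorem np_go_head (c : Char) (fuel : Nat) :
    ∀ (l cur : List Char), l.length ≤ fuel →
      (PySem.Chars.splitOn.go [c] fuel l cur []).headD []
        = cur.reverse ++ l.takeWhile (fun x => !(x == c)) := by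
  induction fuel with
  | zero =>
    intro l cur h
    have : l = [] := List.eq_nil_of_length_eq_zero (Nat.le_zero.mp h)
    subst this; simp [PySem.Chars.splitOn.go]
  | succ n ih =>
    intro l cur h
    cases l with
    | nil => simp [PySem.Chars.splitOn.go]
    | cons d rest =>
      rw [PySem.Chars.splitOn.go]
      split
      · rename_i hp
        have hcd : c = d := by simpa [List.isPrefixOf] using hp
        have : (PySem.Chars.splitOn.go [c] n (List.drop [c].length (d :: rest)) []
            ([] ++ [cur.reverse])).headD [] = cur.reverse := np_go_push _ _ _ _ _ _
        simpa [List.takeWhile_cons, hcd.symm] using this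
      · rename_i hp
        have hcd : ¬ c = d := by simpa [List.isPrefixOf] using hp
        have hlen : rest.length ≤ n := by simpa using Nat.le_of_succ_le_succ h
        rw [ih rest (d :: cur) hlen]
        simp [List.takeWhile_cons, Ne.symm hcd]

theorem np_splitOn_head (xs : List Char) (c : Char) :
    npSplitHead xs c = xs.takeWhile (fun x => !(x == c)) := by
  unfold npSplitHead PySem.Chars.splitOn
  simpa using np_go_head c (xs.length + 1) xs [] (by omega)

theorem np_takeUser (xs : List Char) :
    npTakeUser xs = (xs.takeWhile (fun x => !(x == '/'))).takeWhile (fun x => !(x == '?')) := by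
  induction xs with
  | nil => simp [npTakeUser]
  | cons c rest ih =>
    by_cases h1 : c = '/' <;> by_cases h2 : c = '?' <;>
      simp [npTakeUser, h1, h2, List.takeWhile_cons, ih]

-- A's rest.split('/')[0].split('?')[0] is B's take-until-'/'-or-'?' loop
theorem np_splits (xs : List Char) : npSplitHead (npSplitHead xs '/') '?' = npTakeUser xs := by
  rw [np_splitOn_head, np_splitOn_head, np_takeUser]

theorem np_slice_nat (xs : List Char) (n : Nat) :
    PySem.Chars.slice xs (some ((n : Nat) : Int)) none = xs.drop n := by
  simp [PySem.Chars.slice_eq_listSlice, PySem.List.slice_from]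

-- the heart of the equivalence: A's six-prefix scan equals B's peeling, for every list
theorem np_core_eq (p : List Char) :
    npLoopA p ["https://www.linkedin.com/in/", "https://linkedin.com/in/", "http://www.linkedin.com/in/",
      "http://linkedin.com/in/", "www.linkedin.com/in/", "linkedin.com/in/"] = npCoreB p := by
  have L1 : PySem.Chars.lower "https://www.linkedin.com/in/".toList
      = "https://".toList ++ ("www.".toList ++ "linkedin.com/in/".toList) := by decide
  have L2 : PySem.Chars.lower "https://linkedin.com/in/".toList
      = "https://".toList ++ "linkedin.com/in/".toList := by decide
  have L3 : PySem.Chars.lower "http://www.linkedin.com/in/".toList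
      = "http://".toList ++ ("www.".toList ++ "linkedin.com/in/".toList) := by decide
  have L4 : PySem.Chars.lower "http://linkedin.com/in/".toList
      = "http://".toList ++ "linkedin.com/in/".toList := by decide
  have L5 : PySem.Chars.lower "www.linkedin.com/in/".toList
      = "www.".toList ++ "linkedin.com/in/".toList := by decide
  have L6 : PySem.Chars.lower "linkedin.com/in/".toList = "linkedin.com/in/".toList := by decide
  have e8 : ("https://".toList).length = 8 := by decide
  have e7 : ("http://".toList).length = 7 := by decide
  have e4 : ("www.".toList).length = 4 := by decide
  have n1 : ("https://www.linkedin.com/in/".toList).length = 28 := by decide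
  have n2 : ("https://linkedin.com/in/".toList).length = 24 := by decide
  have n3 : ("http://www.linkedin.com/in/".toList).length = 27 := by decide
  have n4 : ("http://linkedin.com/in/".toList).length = 23 := by decide
  have n5 : ("www.linkedin.com/in/".toList).length = 20 := by decide
  have n6 : ("linkedin.com/in/".toList).length = 16 := by decide
  set low := PySem.Chars.lower p with hlow
  have A1 : PySem.Chars.startswith low (PySem.Chars.lower "https://www.linkedin.com/in/".toList)
      = (PySem.Chars.startswith low "https://".toList
          && (PySem.Chars.startswith (low.drop 8) "www.".toList
              && PySem.Chars.startswith (low.drop 12) "linkedin.com/in/".toList)) := by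
    rw [L1, np_sw_append, np_sw_append, e8, e4, List.drop_drop]
  have A2 : PySem.Chars.startswith low (PySem.Chars.lower "https://linkedin.com/in/".toList)
      = (PySem.Chars.startswith low "https://".toList
          && PySem.Chars.startswith (low.drop 8) "linkedin.com/in/".toList) := by
    rw [L2, np_sw_append, e8]
  have A3 : PySem.Chars.startswith low (PySem.Chars.lower "http://www.linkedin.com/in/".toList)
      = (PySem.Chars.startswith low "http://".toList
          && (PySem.Chars.startswith (low.drop 7) "www.".toList
              && PySem.Chars.startswith (low.drop 11) "linkedin.com/in/".toList)) := by
    rw [L3, np_sw_append, np_sw_append, e7, e4, List.drop_drop]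
  have A4 : PySem.Chars.startswith low (PySem.Chars.lower "http://linkedin.com/in/".toList)
      = (PySem.Chars.startswith low "http://".toList
          && PySem.Chars.startswith (low.drop 7) "linkedin.com/in/".toList) := by
    rw [L4, np_sw_append, e7]
  have A5 : PySem.Chars.startswith low (PySem.Chars.lower "www.linkedin.com/in/".toList)
      = (PySem.Chars.startswith low "www.".toList
          && PySem.Chars.startswith (low.drop 4) "linkedin.com/in/".toList) := by
    rw [L5, np_sw_append, e4]
  simp only [npLoopA, npCoreB, np_slice_nat, np_splits, ← hlow, A1, A2, A3, A4, A5, L6,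
    n1, n2, n3, n4, n5, n6]
  by_cases h1 : PySem.Chars.startswith low ['h','t','t','p','s',':','/','/'] = true
  · have h2 : PySem.Chars.startswith low ['h','t','t','p',':','/','/'] = false :=
      np_sw_excl _ _ (by decide) h1
    have h5 : PySem.Chars.startswith low ['w','w','w','.'] = false :=
      np_sw_excl _ _ (by decide) h1
    have h6 : PySem.Chars.startswith low ['l','i','n','k','e','d','i','n','.','c','o','m','/','i','n','/'] = false :=
      np_sw_excl _ _ (by decide) h1
    by_cases hw : PySem.Chars.startswith (low.drop 8) ['w','w','w','.'] = true
    · have hni : PySem.Chars.startswith (low.drop 8) ['l','i','n','k','e','d','i','n','.','c','o','m','/','i','n','/'] = false :=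
        np_sw_excl _ _ (by decide) hw
      by_cases hl : PySem.Chars.startswith (low.drop 12) ['l','i','n','k','e','d','i','n','.','c','o','m','/','i','n','/'] = true <;>
        simp [h1, h2, h5, h6, hw, hni, hl]
    · by_cases hl : PySem.Chars.startswith (low.drop 8) ['l','i','n','k','e','d','i','n','.','c','o','m','/','i','n','/'] = true <;>
        simp [h1, h2, h5, h6, hw, hl]
  · by_cases h2 : PySem.Chars.startswith low ['h','t','t','p',':','/','/'] = true
    · have h5 : PySem.Chars.startswith low ['w','w','w','.'] = false :=
        np_sw_excl _ _ (by decide) h2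
      have h6 : PySem.Chars.startswith low ['l','i','n','k','e','d','i','n','.','c','o','m','/','i','n','/'] = false :=
        np_sw_excl _ _ (by decide) h2
      by_cases hw : PySem.Chars.startswith (low.drop 7) ['w','w','w','.'] = true
      · have hni : PySem.Chars.startswith (low.drop 7) ['l','i','n','k','e','d','i','n','.','c','o','m','/','i','n','/'] = false :=
          np_sw_excl _ _ (by decide) hw
        by_cases hl : PySem.Chars.startswith (low.drop 11) ['l','i','n','k','e','d','i','n','.','c','o','m','/','i','n','/'] = true <;>
          simp [h1, h2, h5, h6, hw, hni, hl]
      · by_cases hl : PySem.Chars.startswith (low.drop 7) ['l','i','n','k','e','d','i','n','.','c','o','m','/','i','n','/'] = true <;>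
          simp [h1, h2, h5, h6, hw, hl]
    · by_cases hw : PySem.Chars.startswith low ['w','w','w','.'] = true
      · have h6 : PySem.Chars.startswith low ['l','i','n','k','e','d','i','n','.','c','o','m','/','i','n','/'] = false :=
          np_sw_excl _ _ (by decide) hw
        by_cases hl : PySem.Chars.startswith (low.drop 4) ['l','i','n','k','e','d','i','n','.','c','o','m','/','i','n','/'] = true <;>
          simp [h1, h2, h6, hw, hl]
      · by_cases hl : PySem.Chars.startswith low ['l','i','n','k','e','d','i','n','.','c','o','m','/','i','n','/'] = true <;>
          simp [h1, h2, hw, hl]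

-- ===== VERDICT (by name: the statement is the Claim_ definition above) =====
theorem normalize_profile_spec : Claim_equal_normalize_profile := by
  intro profile _
  unfold Spec_normalize_profile normalize_profile normalize_profile_alt
  rw [np_core_eq]
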